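-- pv_equiv track=rewrite | github.com/Rahul140799/Placement-Kit | CodeChef/June2020/tom&jerry.py | eoeo
-- ===== SOURCE A (Python) =====
-- def eoeo(ts):
--     if ts%2 != 0:
--         return ts//2
--     else:
--         while(ts>>1):
--             if (ts>>1)%2 != 0:
--                 if ts == 2:
--                   return 0
--                 return (ts>>1)//2
--             else:
--                 ts = ts>>1
-- ===== SOURCE B (Python) =====
-- def eoeo(ts):
--     if ts % 2 != 0:
--         return ts // 2
--     if ts == 0:
--         return None
--     low = ts & -ts          # lowest set bit: closed-form odd-part extraction
--     return ts // low // 2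
-- ===== Notes on version B (the rewrite author's own statement) =====
-- stated objective: faster
-- what changed: A strips factors of 2 with an iterative right-shift loop; B extracts the odd part in one step with the lowest-set-bit trick ts & -ts and divides once, no loop.
-- outside the precondition, e.g. on eoeo(0): A returns None, B returns None
import Mathlib
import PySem

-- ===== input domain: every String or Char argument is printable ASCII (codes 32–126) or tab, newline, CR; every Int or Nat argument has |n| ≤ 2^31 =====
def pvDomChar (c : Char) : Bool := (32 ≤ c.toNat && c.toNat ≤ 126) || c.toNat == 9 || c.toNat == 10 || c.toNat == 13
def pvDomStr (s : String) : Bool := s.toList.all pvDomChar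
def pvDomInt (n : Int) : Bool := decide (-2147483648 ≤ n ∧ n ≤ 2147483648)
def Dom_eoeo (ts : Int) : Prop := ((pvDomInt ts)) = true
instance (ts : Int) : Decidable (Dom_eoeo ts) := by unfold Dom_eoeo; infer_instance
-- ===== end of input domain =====

-- B replaces A's right-shift while-loop by the loop-free lowest-set-bit trick ts & -ts.
-- ===== PORT A =====
-- the 'while(ts>>1)' loop of A, with explicit fuel as the totality guard (|ts| steps always
-- suffice: ts strictly shrinks each iteration; see loop_eq below).  Falling out of the loop is
-- Python's implicit 'return None', which only happens at ts = 0 (excluded by Pre_); the port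
-- returns 0 there (and on exhausted fuel, which is never reached for ts ≠ 0).
def eoeoLoopFuel : Nat → Int → Int
  | 0, _ => 0
  | fuel + 1, ts =>
    if ts >>> (1 : Nat) = 0 then 0
    else if PySem.Int.mod (ts >>> (1 : Nat)) 2 ≠ 0 then
      (if ts = 2 then 0 else PySem.Int.floordiv (ts >>> (1 : Nat)) 2)
    else eoeoLoopFuel fuel (ts >>> (1 : Nat))

def eoeo (ts : Int) : Int :=
  if PySem.Int.mod ts 2 ≠ 0 then PySem.Int.floordiv ts 2
  else eoeoLoopFuel ts.natAbs ts

-- ===== PORT B =====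
-- Python B returns None at ts = 0 (excluded by Pre_); the port returns 0 there.
def eoeo_alt (ts : Int) : Int :=
  if PySem.Int.mod ts 2 ≠ 0 then PySem.Int.floordiv ts 2
  else if ts = 0 then 0
  else
    let low := PySem.Int.band ts (-ts)
    PySem.Int.floordiv (PySem.Int.floordiv ts low) 2

-- ===== PRECONDITION & SPEC =====
-- Pre_ excludes only ts = 0, where the Python A falls out of its while loop and returns None
-- (no int value); Python B also returns None there.
def Pre_eoeo (ts : Int) : Prop := ts ≠ 0
instance (ts : Int) : Decidable (Pre_eoeo ts) := by unfold Pre_eoeo; infer_instance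
def pvWitness_eoeo : Int := 6

def Spec_eoeo (ts : Int) (out : Int) : Prop := out = eoeo_alt ts
instance (ts : Int) (out : Int) : Decidable (Spec_eoeo ts out) := by unfold Spec_eoeo; infer_instance

-- ===== CLAIM (what is proved, stated in full; the proofs are below) =====
def Claim_equal_eoeo : Prop := ∀ (ts : Int), Dom_eoeo ts → Pre_eoeo ts → Spec_eoeo ts (eoeo ts)

-- ===== LEMMAS AND PROOFS =====

lemma shiftr_one (ts : Int) : ts >>> (1 : Nat) = ts / 2 := by
  rw [Int.shiftRight_eq_div_pow]; norm_num

lemma mod_two (a : Int) : PySem.Int.mod a 2 = a % 2 := by simp [pysem]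

-- n odd: n &&& (n-1) clears the (set) lowest bit
lemma nat_and_pred_odd (n : Nat) (h : n % 2 = 1) : n &&& (n - 1) = n - 1 := by
  apply Nat.eq_of_testBit_eq
  intro k
  cases k with
  | zero =>
    rw [Nat.testBit_and, Nat.testBit_zero, Nat.testBit_zero]
    have h0 : (n - 1) % 2 = 0 := by omega
    simp [h, h0]
  | succ k =>
    rw [Nat.testBit_and]
    simp only [Nat.testBit_succ]
    have e : (n - 1) / 2 = n / 2 := by omega
    rw [e, Bool.and_self]

lemma nat_and_pred_two_mul (a : Nat) (ha : 1 ≤ a) :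
    (2 * a) &&& (2 * a - 1) = 2 * (a &&& (a - 1)) := by
  apply Nat.eq_of_testBit_eq
  intro k
  cases k with
  | zero =>
    rw [Nat.testBit_and, Nat.testBit_zero, Nat.testBit_zero]
    have h1 : (2 * a) % 2 = 0 := by omega
    have h2 : (2 * (a &&& (a - 1))) % 2 = 0 := by omega
    simp [h1, h2]
  | succ k =>
    rw [Nat.testBit_and]
    simp only [Nat.testBit_succ]
    have h1 : (2 * a) / 2 = a := by omega
    have h2 : (2 * a - 1) / 2 = a - 1 := by omega
    have h3 : (2 * (a &&& (a - 1))) / 2 = a &&& (a - 1) := by omega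
    rw [h1, h2, h3, Nat.testBit_and]

-- lowest set bit of n, written the way PySem.Int.band ts (-ts) computes it
def lowf (n : Nat) : Nat := n - (n &&& (n - 1))

lemma lowf_odd (n : Nat) (h : n % 2 = 1) : lowf n = 1 := by
  unfold lowf; rw [nat_and_pred_odd n h]; omega

lemma lowf_two_mul (a : Nat) (ha : 1 ≤ a) : lowf (2 * a) = 2 * lowf a := by
  unfold lowf
  rw [nat_and_pred_two_mul a ha]
  have := Nat.and_le_left (n := a) (m := a - 1)
  omega

lemma lowf_pos (n : Nat) (h : 1 ≤ n) : 1 ≤ lowf n := by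
  unfold lowf
  have h2 : n &&& (n - 1) ≤ n - 1 := Nat.and_le_right
  omega

-- PySem.Int.band ts (-ts) is the lowest set bit of |ts|
lemma band_neg_self (ts : Int) (h : ts ≠ 0) :
    PySem.Int.band ts (-ts) = ((lowf ts.natAbs : Nat) : Int) := by
  unfold PySem.Int.band lowf
  rcases lt_or_gt_of_ne h with hneg | hpos
  · have h1 : ¬ ((0 : Int) ≤ ts) := by omega
    have h2 : (0 : Int) ≤ -ts := by omega
    simp only [h1, h2, if_true, if_false]
    congr 1
    have e1 : (-ts).toNat = ts.natAbs := by omega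
    have e2 : (-ts - 1).toNat = ts.natAbs - 1 := by omega
    rw [e1, e2]
  · have h1 : (0 : Int) ≤ ts := by omega
    have h2 : ¬ ((0 : Int) ≤ -ts) := by omega
    simp only [h1, h2, if_true, if_false]
    congr 1
    have e1 : ts.toNat = ts.natAbs := by omega
    have e2 : (- -ts - 1).toNat = ts.natAbs - 1 := by omega
    rw [e1, e2]

lemma floordiv_pos (a b : Int) (hb : 0 < b) : PySem.Int.floordiv a b = a / b := by
  simp [pysem, hb]

-- the while loop computes odd-part(ts) // 2, i.e. ts // lowbit(ts) // 2
lemma loop_eq (n : Nat) : ∀ (ts : Int), ts.natAbs ≤ n → ts ≠ 0 → ts % 2 = 0 →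
    eoeoLoopFuel n ts = ts / ((lowf ts.natAbs : Nat) : Int) / 2 := by
  induction n with
  | zero => intro ts hle hne _; omega
  | succ n ih =>
    intro ts hle hne heven
    obtain ⟨d, rfl⟩ : ∃ d, ts = 2 * d := ⟨ts / 2, by omega⟩
    have hdne : d ≠ 0 := by omega
    have hdiv : (2 * d) / 2 = d := by omega
    have habs : (2 * d).natAbs = 2 * d.natAbs := by omega
    rw [eoeoLoopFuel, shiftr_one, hdiv, if_neg hdne, mod_two]
    by_cases hodd : d % 2 = 0
    · -- inner value even: A shifts and loops again
      rw [if_neg (by simp [hodd])]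
      rw [ih d (by omega) hdne hodd, habs, lowf_two_mul _ (by omega)]
      congr 1
      push_cast
      rw [Int.mul_ediv_mul_of_pos _ _ (by norm_num : (0:Int) < 2)]
    · -- inner value odd: A returns (ts>>1)//2 (and 0 at ts = 2, which is 1//2 anyway)
      rw [if_pos (by omega)]
      have hlow : lowf (2 * d).natAbs = 2 := by
        rw [habs, lowf_two_mul _ (by omega), lowf_odd _ (by omega)]
      rw [hlow, floordiv_pos _ _ (by norm_num), show ((2:Nat):Int) = 2 by norm_num, hdiv]
      by_cases h2 : 2 * d = 2
      · rw [if_pos h2]; omega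
      · rw [if_neg h2]

-- ===== VERDICT (by name: the statement is the Claim_ definition above) =====
theorem eoeo_spec : Claim_equal_eoeo := by
  intro ts _ hpre
  have hne : ts ≠ 0 := hpre
  unfold Spec_eoeo eoeo eoeo_alt
  by_cases hodd : PySem.Int.mod ts 2 ≠ 0
  · rw [if_pos hodd, if_pos hodd]
  · rw [if_neg hodd, if_neg hodd, if_neg hne]
    rw [mod_two] at hodd
    simp only [ne_eq, not_not] at hodd
    show eoeoLoopFuel ts.natAbs ts =
      PySem.Int.floordiv (PySem.Int.floordiv ts (PySem.Int.band ts (-ts))) 2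
    have hlowpos : (0 : Int) < ((lowf ts.natAbs : Nat) : Int) := by
      have := lowf_pos ts.natAbs (by omega)
      omega
    rw [band_neg_self ts hne, floordiv_pos _ _ hlowpos,
        floordiv_pos _ _ (by norm_num : (0:Int) < 2)]
    exact loop_eq ts.natAbs ts le_rfl hne hodd
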